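/- GENERATED by tools/from_farm_form.py from farm/worked/free/Proof.lean (a worked proof of the farm's unit `free`,
   accepted by the verdict) — do not edit. -/
import ProgX.Base.Spec.Units.free

open X86 X86.User Asan ProgX.Base

set_option maxRecDepth 4000
set_option maxHeartbeats 4000000

/-- `free` (c/base/heap.c; 0x103800 in the base image, 12 instructions) satisfies `ProgX.Base.Spec.free.spec`, given the contracts of
`heap_live_size` and of the runtime's `arena_poison`.
(Carried over from agent GA's proof against its test image, c/heap/heaptest.elf: tools/port_heap_units.py.) -/
theorem ProgX.Base.Spec.Proved.free_ok : ProgX.Base.Spec.free.Statement := by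
  intro Lay hLay μ hμ u₀ hcode h_live_size hpoison H rest frames n u ret he hpre
  have hsize := h_live_size H n
  v_entry he
  obtain ⟨hp, hcase⟩ := hpre
  have hok := hp.inv.heap
  have hbase := hp.base
  have hlimit := hp.limit
  have hroom := hok.room
  rw [hbase, hlimit] at hroom
  u_walk hcode [hμ.vendor] span [ProgX.Base.L.textLo, ProgX.Base.L.textHi] side (v_side)
  case call_inv =>
    v_inv
  case pre_103809 =>
    -- the precondition of `heap_live_size(p)`: the heap is in memory (two stack stores since the entry), `p` is live
    have hrdi : s_103809.reg .rdi = u.reg .rdi := w_kept.get .rdi (by rfl)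
    have hsame : Mem.EqOn H.base H.limit u.mem s_103809.mem := by
      rw [hbase, hlimit]
      u_memnorm
      u_eqon
    refine ⟨hok.eqOn hsame, hbase, ?_⟩
    rw [hrdi]
    exact hcase.resolve_left hbr_103803
  case cont =>
    -- `p = 0`: `ret` at once
    refine ReachVia.done ?_
    v_returned
    refine ⟨fun _ => ⟨?_, ?_⟩, fun hne => absurd hbr_103803 hne⟩
    · rw [w_mem]
      exact hp.inv
    · rw [w_mem]
      exact Mem.EqOn.refl _ _ _
  case cont =>
    -- after `heap_live_size`: rax = n; `mov rsi, rax ; mov [rbx - 24], FREED ; mov rdi, rbx ; call arena_poison`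
    have hlive : H.Live (u.reg .rdi).toNat n := hcase.resolve_left hbr_103803
    obtain ⟨c, hlc⟩ := hlive
    have hr := hok.obj_range hlc
    have hi := hok.obj_inside hlc
    have ha := hok.obj_aligned hlc
    have hsc := hok.size_le_cap hlc
    simp only at hr hi ha hsc
    rw [hbase] at hr
    rw [hlimit] at hi
    obtain ⟨hrax, hmemeq⟩ := w_post
    rw [w_mem_103809] at hmemeq
    obtain ⟨rv, hrv⟩ : ∃ rv, s_103809r.reg .rax = rv := ⟨_, rfl⟩
    rw [hrv] at hrax
    v_after_call w_rsp_103809 w_mem_103809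
    clear w_same
    u_walk hcode [hμ.vendor] span [ProgX.Base.L.textLo, ProgX.Base.L.textHi] side (v_side)
    case call_inv =>
      v_inv
    case pre_10381c =>
      -- the precondition of `arena_poison(p, n)`: `p` is 16-aligned and `[p, p + n)` lies in the data space
      show (s_10381c.reg .rdi).toNat % 8 = 0 ∧ 0x100000 ≤ (s_10381c.reg .rdi).toNat ∧
        (s_10381c.reg .rdi).toNat + ((s_10381c.reg .rsi).toNat + 7) / 8 * 8 ≤ 0xC00000
      rw [w_rdi, w_rsi, hrax]
      omega
    case cont =>
      -- after `arena_poison`: `pop rbx ; ret`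
      obtain ⟨hmem, hkeep⟩ := w_post
      rw [w_rdi_10381c, w_rsi_10381c, hrax] at hmem
      have hmem' := hmem.symm
      clear hmem
      v_after_call w_rsp_10381c w_mem_10381c
      simp only [ProgX.Spec.arenaPoisonSpec_writes, shadowSpan, w_rdi_10381c, w_rsi_10381c, hrax] at w_same
      have hs0 : UInt64.ofNat (s_10381cr.mem.readLE (u.reg .rsp) 8) = ret := by
        u_frame he_retAddr
      have hp1 : UInt64.ofNat (s_10381c.mem.readLE (u.reg .rsp - 8) 8) = u.reg .rbx := by u_resolve
      have hs1 : UInt64.ofNat (s_10381cr.mem.readLE (u.reg .rsp - 8) 8) = u.reg .rbx := by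
        rw [w_mem_10381c] at hp1
        u_frame hp1
      u_walk hcode [hμ.vendor] span [ProgX.Base.L.textLo, ProgX.Base.L.textHi] side (v_side)
      refine ReachVia.done ?_
      v_returned
      · -- the post: the object at `p` is freed
        refine ⟨fun h0 => absurd h0 hbr_103803, fun _ => ?_⟩
        rw [w_mem, ← hmem']
        refine hp.inv.free ⟨c, hlc⟩ ?_ ?_ ?_ ?_
        · rw [w_mem_10381c]
          v_untouched
        · rw [ProgX.Spec.ofNat_toNat_sub _ 24 (by omega), w_mem_10381c]
          simp only [HState.magic, UInt64.reduceOfNat]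
          u_read
        · rw [hbase, w_mem_10381c]
          u_memnorm
          u_eqon
        · rw [hlimit, w_mem_10381c]
          u_memnorm
          u_eqon
      · -- the footprint
        simp only [X86.User.Spec.footprint, vspec, shadowSpan]
        u_same
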